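-- pv_equiv track=rewrite | github.com/ourresearch/openalex-elastic-api | core/search.py | check_is_search_query
-- ===== SOURCE A (Python) =====
-- def check_is_search_query(filter_params, search):
--     search_keys = [
--         "abstract.search",
--         "default.search",
--         "display_name.search",
--         "fulltext.search",
--         "keyword.search",
--         "raw_affiliation_strings.search",
--         "raw_author_name.search",
--         "semantic.search",
--         "title.search",
--         "title_and_abstract.search",
--     ]
--
--     if search and search != '""':
--         return True
--
--     if filter_params:
--         for filter in filter_params:
--             for key in search_keys:
--                 if filter.get(key, "") != "":
--                     return True
--
--     return False
-- ===== SOURCE B (Python) =====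
-- SEARCH_KEYS = frozenset([
--     "abstract.search",
--     "default.search",
--     "display_name.search",
--     "fulltext.search",
--     "keyword.search",
--     "raw_affiliation_strings.search",
--     "raw_author_name.search",
--     "semantic.search",
--     "title.search",
--     "title_and_abstract.search",
-- ])
--
--
-- def check_is_search_query(filter_params, search):
--     if search and search != '""':
--         return True
--     nonempty_keys = set()
--     for f in filter_params:
--         for k, v in f.items():
--             if v != "":
--                 nonempty_keys.add(k)
--     return not SEARCH_KEYS.isdisjoint(nonempty_keys)
-- ===== Notes on version B (the rewrite author's own statement) =====
-- stated objective: alternative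
-- what changed: Instead of probing each filter dict with ten fixed .get calls and returning early, B first accumulates the set of keys that carry a non-empty value across all filters, then answers with a single set-disjointness test against a frozenset of search keys.
import Mathlib
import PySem

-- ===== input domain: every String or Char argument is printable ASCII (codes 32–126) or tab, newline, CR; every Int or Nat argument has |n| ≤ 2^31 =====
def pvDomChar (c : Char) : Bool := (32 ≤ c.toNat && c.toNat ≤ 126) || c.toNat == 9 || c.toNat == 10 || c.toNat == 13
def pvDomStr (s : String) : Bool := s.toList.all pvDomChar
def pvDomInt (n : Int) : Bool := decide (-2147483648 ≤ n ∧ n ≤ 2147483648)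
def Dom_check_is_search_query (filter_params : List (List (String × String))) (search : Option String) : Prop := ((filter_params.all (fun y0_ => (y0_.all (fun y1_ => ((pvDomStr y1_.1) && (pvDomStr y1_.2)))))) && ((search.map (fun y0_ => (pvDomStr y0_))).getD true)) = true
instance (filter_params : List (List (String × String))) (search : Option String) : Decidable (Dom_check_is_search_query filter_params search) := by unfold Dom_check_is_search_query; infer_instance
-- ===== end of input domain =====

-- B replaces A's ten fixed early-return dict probes per filter by a staged algorithm:
-- accumulate the set of keys with non-empty values, then one set-disjointness test (alternative).


-- ===== PORT A =====
def pvSearchKeys : List String :=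
  [ "abstract.search", "default.search", "display_name.search", "fulltext.search",
    "keyword.search", "raw_affiliation_strings.search", "raw_author_name.search",
    "semantic.search", "title.search", "title_and_abstract.search" ]

def check_is_search_query (filter_params : List (List (String × String))) (search : Option String) : Bool :=
  -- if search and search != '""': return True
  if (match search with | none => false | some s => s != "" && s != "\"\"") then
    true
  -- if filter_params: for filter in filter_params: for key in search_keys: if filter.get(key, "") != "": return True
  else if filter_params != [] then
    filter_params.any (fun filter =>
      pvSearchKeys.any (fun key => (PySem.Dict.mk filter).getD key "" != ""))
  else
    false

-- ===== PORT B =====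
def pvSearchKeySet : PySem.Set String :=
  PySem.Set.ofList
    [ "abstract.search", "default.search", "display_name.search", "fulltext.search",
      "keyword.search", "raw_affiliation_strings.search", "raw_author_name.search",
      "semantic.search", "title.search", "title_and_abstract.search" ]

-- nonempty_keys = set(); for f in filter_params: for k, v in f.items(): if v != "": nonempty_keys.add(k)
def pvNonemptyKeys (filter_params : List (List (String × String))) : PySem.Set String :=
  filter_params.foldl
    (fun acc f => f.foldl
      (fun acc2 kv => if kv.2 != "" then PySem.Set.add acc2 kv.1 else acc2) acc)
    PySem.Set.empty

def check_is_search_query_alt (filter_params : List (List (String × String))) (search : Option String) : Bool :=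
  if (match search with | none => false | some s => s != "" && s != "\"\"") then
    true
  else
    -- return not SEARCH_KEYS.isdisjoint(nonempty_keys)
    !(PySem.Set.isdisjoint pvSearchKeySet (pvNonemptyKeys filter_params))

-- ===== PRECONDITION & SPEC =====
-- Pre_ excludes association lists in which some filter repeats a key: such lists do not
-- represent any Python dict (dict keys are unique), so A's first-match .get order there is
-- an artefact of the encoding.
def Pre_check_is_search_query (filter_params : List (List (String × String))) (search : Option String) : Prop :=
  ∀ f ∈ filter_params, (f.map Prod.fst).Nodup
instance (filter_params : List (List (String × String))) (search : Option String) : Decidable (Pre_check_is_search_query filter_params search) := by unfold Pre_check_is_search_query; infer_instance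

def pvWitness_check_is_search_query : (List (List (String × String))) × Option String :=
  ([[("title.search", "dna"), ("per_page", "25")]], none)

def Spec_check_is_search_query (filter_params : List (List (String × String))) (search : Option String) (out : Bool) : Prop := out = check_is_search_query_alt filter_params search
instance (filter_params : List (List (String × String))) (search : Option String) (out : Bool) : Decidable (Spec_check_is_search_query filter_params search out) := by unfold Spec_check_is_search_query; infer_instance

-- ===== CLAIM (what is proved, stated in full; the proofs are below) =====
def Claim_equal_check_is_search_query : Prop := ∀ (filter_params : List (List (String × String))) (search : Option String), Dom_check_is_search_query filter_params search → Pre_check_is_search_query filter_params search → Spec_check_is_search_query filter_params search (check_is_search_query filter_params search)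

-- ===== LEMMAS AND PROOFS =====

-- A's probe succeeds only on a pair actually present in the filter.
theorem pv_getD_ne_imp {f : List (String × String)} {k : String}
    (h : (PySem.Dict.mk f).getD k "" ≠ "") : ∃ v, (k, v) ∈ f ∧ v ≠ "" := by
  induction f with
  | nil => simp [PySem.Dict.getD, PySem.Dict.get?] at h
  | cons p rest ih =>
    obtain ⟨k', v'⟩ := p
    rw [PySem.Dict.getD, PySem.Dict.get?_mk_cons] at h
    by_cases hk : k' = k
    · subst hk
      simp at h
      exact ⟨v', by simp, h⟩
    · simp [hk] at h
      obtain ⟨v, hv, hne⟩ := ih (by rw [PySem.Dict.getD]; exact h)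
      exact ⟨v, by simp [hv], hne⟩

-- With unique keys, a present pair is what A's probe finds.
theorem pv_mem_imp_getD {f : List (String × String)} {k v : String}
    (hnd : (f.map Prod.fst).Nodup) (hm : (k, v) ∈ f) :
    (PySem.Dict.mk f).getD k "" = v := by
  induction f with
  | nil => simp at hm
  | cons p rest ih =>
    obtain ⟨k', v'⟩ := p
    rw [List.map_cons, List.nodup_cons] at hnd
    rw [PySem.Dict.getD, PySem.Dict.get?_mk_cons]
    rcases List.mem_cons.mp hm with h | h
    · cases h; simp
    · have hk : k' ≠ k := by
        intro he; subst he
        exact hnd.1 (List.mem_map.mpr ⟨(k', v), h, rfl⟩)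
      simp only [beq_iff_eq, if_neg hk]
      rw [PySem.Dict.getD] at ih
      exact ih hnd.2 h

-- Membership in the inner accumulation over one filter's items.
theorem pv_mem_inner (f : List (String × String)) (acc : PySem.Set String) (k : String) :
    k ∈ f.foldl (fun acc2 kv => if kv.2 != "" then PySem.Set.add acc2 kv.1 else acc2) acc ↔
    k ∈ acc ∨ ∃ v, (k, v) ∈ f ∧ v ≠ "" := by
  induction f generalizing acc with
  | nil => simp
  | cons kv rest ih =>
    obtain ⟨k', v'⟩ := kv
    simp only [List.foldl_cons, ih]
    by_cases hv : v' = ""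
    · subst hv; simp
      constructor
      · rintro (h | ⟨v, hm, hvne⟩)
        · exact Or.inl h
        · exact Or.inr ⟨v, Or.inr hm, hvne⟩
      · rintro (h | ⟨v, (⟨he, hve⟩ | hm), hv⟩)
        · exact Or.inl h
        · exact absurd hve hv
        · exact Or.inr ⟨v, hm, hv⟩
    · have hv' : (v' != "") = true := by simpa using hv
      simp only [hv', if_true, PySem.Set.mem_add]
      constructor
      · rintro (h | h)
        · rcases h with h | h
          · exact Or.inl h
          · subst h; exact Or.inr ⟨v', by simp, hv⟩
        · obtain ⟨v, hm, hvne⟩ := h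
          exact Or.inr ⟨v, by simp [hm], hvne⟩
      · rintro (h | ⟨v, hm, hvne⟩)
        · exact Or.inl (Or.inl h)
        · rcases List.mem_cons.mp hm with he | hm'
          · have h1 : k = k' := congrArg Prod.fst he
            exact Or.inl (Or.inr h1)
          · exact Or.inr ⟨v, hm', hvne⟩

-- Membership in the accumulated set of non-empty-valued keys.
theorem pv_mem_nonempty (fp : List (List (String × String))) (k : String) :
    k ∈ pvNonemptyKeys fp ↔ ∃ f ∈ fp, ∃ v, (k, v) ∈ f ∧ v ≠ "" := by
  unfold pvNonemptyKeys
  have : ∀ acc : PySem.Set String,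
      k ∈ fp.foldl (fun acc f => f.foldl
        (fun acc2 kv => if kv.2 != "" then PySem.Set.add acc2 kv.1 else acc2) acc) acc ↔
      k ∈ acc ∨ ∃ f ∈ fp, ∃ v, (k, v) ∈ f ∧ v ≠ "" := by
    induction fp with
    | nil => simp
    | cons f rest ih =>
      intro acc
      simp only [List.foldl_cons, ih, pv_mem_inner]
      constructor
      · rintro ((h | h) | h)
        · exact Or.inl h
        · exact Or.inr ⟨f, by simp, h⟩
        · obtain ⟨g, hg, hv⟩ := h; exact Or.inr ⟨g, by simp [hg], hv⟩
      · rintro (h | ⟨g, hg, hv⟩)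
        · exact Or.inl (Or.inl h)
        · rcases List.mem_cons.mp hg with he | hg'
          · subst he; exact Or.inl (Or.inr hv)
          · exact Or.inr ⟨g, hg', hv⟩
  simpa [PySem.Set.empty] using this PySem.Set.empty

theorem pv_body_eq (fp : List (List (String × String)))
    (hpre : ∀ f ∈ fp, (f.map Prod.fst).Nodup) :
    (fp.any (fun filter => pvSearchKeys.any (fun key => (PySem.Dict.mk filter).getD key "" != ""))) =
    (!(PySem.Set.isdisjoint pvSearchKeySet (pvNonemptyKeys fp))) := by
  apply Bool.eq_iff_iff.mpr
  rw [Bool.not_eq_eq_eq_not, Bool.not_true, ← Bool.not_eq_true, PySem.Set.isdisjoint_iff]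
  simp only [List.any_eq_true, bne_iff_ne, not_forall, not_not]
  constructor
  · rintro ⟨f, hf, key, hkey, hne⟩
    obtain ⟨v, hv, hvne⟩ := pv_getD_ne_imp hne
    refine ⟨key, ?_, (pv_mem_nonempty fp key).mpr ⟨f, hf, v, hv, hvne⟩⟩
    have he : pvSearchKeySet = pvSearchKeys := by decide
    rw [he]; exact hkey
  · rintro ⟨key, hks, hmem⟩
    obtain ⟨f, hf, v, hv, hvne⟩ := (pv_mem_nonempty fp key).mp hmem
    refine ⟨f, hf, key, ?_, ?_⟩
    · have he : pvSearchKeySet = pvSearchKeys := by decide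
      rw [← he]; exact hks
    · rw [pv_mem_imp_getD (hpre f hf) hv]; exact hvne

-- ===== VERDICT (by name: the statement is the Claim_ definition above) =====
theorem check_is_search_query_spec : Claim_equal_check_is_search_query := by
  intro filter_params search _ hpre
  unfold Spec_check_is_search_query check_is_search_query check_is_search_query_alt
  have hempty : pvNonemptyKeys ([] : List (List (String × String))) = PySem.Set.empty := rfl
  have hbody : (if (filter_params != []) = true then
      filter_params.any (fun filter => pvSearchKeys.any (fun key => (PySem.Dict.mk filter).getD key "" != ""))
      else false) =
      (!(PySem.Set.isdisjoint pvSearchKeySet (pvNonemptyKeys filter_params))) := by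
    by_cases h : filter_params = []
    · subst h; decide
    · rw [if_pos (by simpa using h)]
      exact pv_body_eq filter_params hpre
  cases search with
  | none => simpa using hbody
  | some s =>
    by_cases hs : (s != "" && s != "\"\"") = true
    · simp only [hs, if_true]
    · simp only [Bool.not_eq_true] at hs
      simp only [hs, Bool.false_eq_true, if_false]
      exact hbody
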